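-- pv_equiv track=rewrite | github.com/xiruzhu/599_PROJECT | generate_input_keras_style.py | split_punct
-- ===== SOURCE A (Python) =====
-- def split_punct(some_string):
--     accumulated_word = [];
--     word = "";
--     for character in some_string:
--         if character.isalnum() or character == '\'':
--             word += str(character);
--         else:
--             accumulated_word.append(word);
--             accumulated_word.append(str(character));
--             word = "";
--     if len(word) > 0:
--         accumulated_word.append(word);
--     return accumulated_word;
-- ===== SOURCE B (Python) =====
-- import re
--
-- def split_punct(some_string):
--     # split on any single char that is not alphanumeric and not an apostrophe
--     # (underscore is in \w but is a separator for this task), keeping the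
--     # delimiters via the capturing group; re.split leaves a trailing '' when
--     # the string ends with a delimiter (and [''] for empty input), which the
--     # accumulator version never emits, so drop that one trailing ''.
--     parts = re.split(r"([^\w']|_)", some_string)
--     if parts and parts[-1] == "":
--         parts.pop()
--     return parts
-- ===== Notes on version B (the rewrite author's own statement) =====
-- stated objective: idiomatic
-- what changed: Replaces the char-by-char accumulator loop with one re.split on a capturing delimiter class (with _ re-added since \w keeps it), dropping the single trailing empty piece re.split leaves when the string ends in a delimiter.
import Mathlib
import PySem

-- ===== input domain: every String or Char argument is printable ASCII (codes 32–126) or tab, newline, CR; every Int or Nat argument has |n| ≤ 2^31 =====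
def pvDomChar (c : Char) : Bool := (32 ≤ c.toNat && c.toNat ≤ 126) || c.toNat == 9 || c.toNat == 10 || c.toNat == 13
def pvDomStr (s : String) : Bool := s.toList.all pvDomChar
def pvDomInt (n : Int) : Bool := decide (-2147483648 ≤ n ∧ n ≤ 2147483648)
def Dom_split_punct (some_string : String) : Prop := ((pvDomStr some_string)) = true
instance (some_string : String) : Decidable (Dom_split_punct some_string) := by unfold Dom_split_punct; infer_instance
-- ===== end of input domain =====

-- B tokenizes with one regex split (kept delimiters) instead of A's char accumulator loop; same return value, idiomatic objective.


-- word character: alphanumeric or apostrophe (exact on the ASCII domain)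
def pvWordChar (c : Char) : Bool := PySem.Chars.isalnum c || c == '\''

-- ===== PORT A =====
-- A's loop state: (accumulated_word, word); word kept as List Char, String.ofList at append points
def split_punct (some_string : String) : List String :=
  let st := some_string.toList.foldl
    (fun (st : List String × List Char) character =>
      if pvWordChar character then (st.1, st.2 ++ [character])
      else (st.1 ++ [String.ofList st.2, String.ofList [character]], []))
    ([], [])
  if st.2.length > 0 then st.1 ++ [String.ofList st.2] else st.1

-- ===== PORT B =====
-- hand port of re.split(r"([^\w']|_)", s): pieces between single-char delimiters,
-- delimiters kept; empty input yields [""]  (exact for this pattern on ASCII)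
def pvReSplitKeep : List Char → List (List Char)
  | [] => [[]]
  | c :: cs =>
    if pvWordChar c then
      match pvReSplitKeep cs with
      | [] => [[c]]
      | h :: t => (c :: h) :: t
    else [] :: [c] :: pvReSplitKeep cs

def split_punct_alt (some_string : String) : List String :=
  let parts := pvReSplitKeep some_string.toList
  let parts := if parts.getLast? = some [] then parts.dropLast else parts
  parts.map String.ofList

-- ===== PRECONDITION & SPEC =====
def Spec_split_punct (some_string : String) (out : List String) : Prop := out = split_punct_alt some_string
instance (some_string : String) (out : List String) : Decidable (Spec_split_punct some_string out) := by unfold Spec_split_punct; infer_instance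

-- ===== CLAIM (what is proved, stated in full; the proofs are below) =====
def Claim_equal_split_punct : Prop := ∀ (some_string : String), Dom_split_punct some_string → Spec_split_punct some_string (split_punct some_string)

-- ===== LEMMAS AND PROOFS =====

def pvTrim (l : List (List Char)) : List (List Char) :=
  if l.getLast? = some [] then l.dropLast else l

def pvConsH (w : List Char) : List (List Char) → List (List Char)
  | [] => [w]
  | h :: t => (w ++ h) :: t

theorem pvReSplitKeep_ne_nil (cs : List Char) : pvReSplitKeep cs ≠ [] := by
  cases cs with
  | nil => simp [pvReSplitKeep]
  | cons c cs =>
    simp only [pvReSplitKeep]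
    split
    · cases h : pvReSplitKeep cs <;> simp
    · simp

theorem pvTrim_cons {x : List Char} {l : List (List Char)} (h : l ≠ []) :
    pvTrim (x :: l) = x :: pvTrim l := by
  cases l with
  | nil => exact absurd rfl h
  | cons y t =>
    unfold pvTrim
    simp only [List.getLast?_cons_cons, List.dropLast]
    split <;> rfl

theorem pv_main (cs : List Char) (acc : List String) (w : List Char) :
    (let st := cs.foldl
        (fun (st : List String × List Char) character =>
          if pvWordChar character then (st.1, st.2 ++ [character])
          else (st.1 ++ [String.ofList st.2, String.ofList [character]], []))
        (acc, w)
      if st.2.length > 0 then st.1 ++ [String.ofList st.2] else st.1)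
    = acc ++ (pvTrim (pvConsH w (pvReSplitKeep cs))).map String.ofList := by
  induction cs generalizing acc w with
  | nil =>
    simp only [List.foldl_nil, pvReSplitKeep, pvConsH, pvTrim]
    by_cases hw : w = []
    · subst hw; simp
    · have : w.length > 0 := List.length_pos_iff.mpr hw
      simp [this, hw, List.getLast?]
  | cons c cs ih =>
    simp only [List.foldl_cons]
    by_cases hc : pvWordChar c
    · simp only [hc, if_pos]
      rw [ih]
      congr 2
      simp only [pvReSplitKeep, hc, if_true]
      cases h : pvReSplitKeep cs with
      | nil => exact absurd h (pvReSplitKeep_ne_nil cs)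
      | cons hd tl => simp [pvConsH]
    · simp only [hc, if_false, Bool.false_eq_true]
      rw [ih]
      simp only [pvReSplitKeep, hc, if_false, Bool.false_eq_true]
      have h1 : pvConsH w ([] :: [c] :: pvReSplitKeep cs)
          = w :: [c] :: pvReSplitKeep cs := by simp [pvConsH]
      have h2 : pvConsH ([] : List Char) (pvReSplitKeep cs) = pvReSplitKeep cs := by
        cases h : pvReSplitKeep cs with
        | nil => exact absurd h (pvReSplitKeep_ne_nil cs)
        | cons hd tl => simp [pvConsH]
      rw [h1, h2, pvTrim_cons (by simp),
          pvTrim_cons (pvReSplitKeep_ne_nil cs)]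
      simp

-- ===== VERDICT (by name: the statement is the Claim_ definition above) =====
theorem split_punct_spec : Claim_equal_split_punct := by
  intro s _
  show split_punct s = split_punct_alt s
  have h2 : pvConsH ([] : List Char) (pvReSplitKeep s.toList) = pvReSplitKeep s.toList := by
    cases h : pvReSplitKeep s.toList with
    | nil => exact absurd h (pvReSplitKeep_ne_nil s.toList)
    | cons hd tl => simp [pvConsH]
  have := pv_main s.toList [] []
  simpa [split_punct, split_punct_alt, pvTrim, h2] using this
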